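-- pv_equiv track=rewrite | github.com/AnasAlBahri/cuda-quantum | qasm3-cudaq-validation-bench/scripts/run_validation.py | _dut_qubitkey_to_c0_first_classicalkey
-- ===== SOURCE A (Python) =====
-- from typing import Dict, Tuple, List
--
-- def _strip_key(k: str) -> str:
--     # Qiskit may include spaces between registers; remove them.
--     return str(k).replace(" ", "")
--
-- def _dut_qubitkey_to_c0_first_classicalkey(
--     qubit_key: str,
--     n_qubits: int,
--     n_clbits: int,
--     dut_order: str,
--     meas_q2c: List[int],
-- ) -> str:
--     """
--     Convert a DUT key (interpreted as *qubit bits*) into canonical classical key "c0..".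
--     - dut_order="cudaq": key is "q0 q1 ... q_{n-1}"
--     - dut_order="qiskit": key is "q_{n-1} ... q0" (rare, but support)
--     meas_q2c[q] = classical bit index that receives measure(q), or -1 if not measured.
--     """
--     kk = _strip_key(qubit_key)
--     if len(kk) != n_qubits:
--         # If CUDA-Q returns something unexpected, fall back without crashing.
--         # Pad/truncate to n_qubits (best-effort).
--         if len(kk) < n_qubits:
--             kk = kk.rjust(n_qubits, "0")
--         else:
--             kk = kk[-n_qubits:]
--
--     # Extract qubit bits as array qb[q] in {0,1}
--     qb = [0] * n_qubits
--     if dut_order == "cudaq":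
--         # kk[i] corresponds to q[i]
--         for i in range(n_qubits):
--             qb[i] = 1 if kk[i] == "1" else 0
--     elif dut_order == "qiskit":
--         # kk[0] corresponds to q[n-1]
--         for i in range(n_qubits):
--             qb[i] = 1 if kk[n_qubits - 1 - i] == "1" else 0
--     else:
--         raise ValueError(f"Unknown dut_order: {dut_order}")
--
--     # Build classical bits c[0..]
--     cb = [0] * n_clbits
--     for q in range(n_qubits):
--         c = meas_q2c[q] if q < len(meas_q2c) else -1
--         if c is None or c < 0 or c >= n_clbits:
--             continue
--         cb[c] = qb[q]
--
--     return "".join("1" if cb[i] else "0" for i in range(n_clbits))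
-- ===== SOURCE B (Python) =====
-- from typing import List
--
-- def _dut_qubitkey_to_c0_first_classicalkey(
--     qubit_key: str,
--     n_qubits: int,
--     n_clbits: int,
--     dut_order: str,
--     meas_q2c: List[int],
-- ) -> str:
--     # Gather via an inverse classical->qubit index instead of scattering over qubits.
--     if dut_order != "cudaq" and dut_order != "qiskit":
--         raise ValueError(f"Unknown dut_order: {dut_order}")
--     kk = str(qubit_key).replace(" ", "")
--     if len(kk) < n_qubits:
--         kk = "0" * (n_qubits - len(kk)) + kk
--     elif n_qubits < len(kk):
--         kk = kk[len(kk) - n_qubits:]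
--     # inverse map: c2q[c] = last qubit measured into classical bit c, else -1
--     c2q = [-1] * max(n_clbits, 0)
--     for q in range(min(n_qubits, len(meas_q2c))):
--         c = meas_q2c[q]
--         if 0 <= c < n_clbits:
--             c2q[c] = q
--     out = []
--     for c in range(n_clbits):
--         q = c2q[c]
--         if q < 0:
--             out.append("0")
--         else:
--             pos = q if dut_order == "cudaq" else n_qubits - 1 - q
--             out.append("1" if kk[pos] == "1" else "0")
--     return "".join(out)
-- ===== Notes on version B (the rewrite author's own statement) =====
-- stated objective: alternative
-- what changed: B replaces A's scatter (build a qubit-bit array qb, then write cb[c]=qb[q] for each qubit) by a gather: it builds an inverse index c2q[c]=last qubit measured into c and emits each output bit by reading the key string directly at the position determined by c2q and dut_order, never materialising qb or cb.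
import Mathlib
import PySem

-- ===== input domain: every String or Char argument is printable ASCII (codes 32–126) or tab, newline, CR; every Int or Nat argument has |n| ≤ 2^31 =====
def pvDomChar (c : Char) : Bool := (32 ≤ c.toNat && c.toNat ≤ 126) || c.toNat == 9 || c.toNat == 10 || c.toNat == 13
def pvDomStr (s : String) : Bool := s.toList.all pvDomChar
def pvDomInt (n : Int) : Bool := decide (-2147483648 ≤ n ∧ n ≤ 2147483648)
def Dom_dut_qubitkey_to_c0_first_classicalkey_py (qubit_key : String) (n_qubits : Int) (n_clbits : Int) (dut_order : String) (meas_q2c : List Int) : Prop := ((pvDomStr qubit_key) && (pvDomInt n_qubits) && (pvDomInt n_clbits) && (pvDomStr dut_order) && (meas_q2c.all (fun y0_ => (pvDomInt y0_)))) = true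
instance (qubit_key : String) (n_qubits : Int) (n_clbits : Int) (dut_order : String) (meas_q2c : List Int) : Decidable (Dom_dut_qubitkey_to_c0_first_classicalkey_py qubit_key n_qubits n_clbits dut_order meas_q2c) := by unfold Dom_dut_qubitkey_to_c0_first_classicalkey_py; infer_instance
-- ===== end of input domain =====

-- B gathers output bits through an inverse classical->qubit index instead of scattering
-- qubit bits into a classical array (same cost, different decomposition).

-- ===== PORT A =====
-- helper: the scatter loop 'cb = [0]*n_clbits; for q in range(n_qubits): ... cb[c] = qb[q]'
def pvA_cb (qb : List Int) (n_qubits : Int) (n_clbits : Int) (meas_q2c : List Int) : List Int :=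
  (PySem.List.pyRange 0 n_qubits 1).foldl (fun cb q =>
      let c := if q < (meas_q2c.length : Int) then PySem.List.pyGetD meas_q2c q (-1) else -1
      if c < 0 ∨ n_clbits ≤ c then cb
      else PySem.List.pySetD cb c (PySem.List.pyGetD qb q 0))
    (List.replicate n_clbits.toNat (0 : Int))

-- helper: the trailing part of A shared by both dut_order branches (cb scatter loop + join)
def pvA_finish (qb : List Int) (n_qubits : Int) (n_clbits : Int) (meas_q2c : List Int) : String :=
  PySem.Str.join "" ((PySem.List.pyRange 0 n_clbits 1).map (fun i =>
      if PySem.List.pyGetD (pvA_cb qb n_qubits n_clbits meas_q2c) i 0 ≠ 0 then "1" else "0"))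

-- helper: kk after _strip_key and the pad/truncate fixup (as List Char)
def pvA_kk (qubit_key : String) (n_qubits : Int) : List Char :=
  let kk0 := (PySem.Str.replace qubit_key " " "").toList
  if (kk0.length : Int) ≠ n_qubits then
    if (kk0.length : Int) < n_qubits then
      List.replicate (n_qubits - kk0.length).toNat '0' ++ kk0   -- kk.rjust(n_qubits, "0")
    else PySem.List.slice kk0 (some (-n_qubits)) none           -- kk[-n_qubits:]
  else kk0

def dut_qubitkey_to_c0_first_classicalkey_py (qubit_key : String) (n_qubits : Int) (n_clbits : Int) (dut_order : String) (meas_q2c : List Int) : String :=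
  let kk := pvA_kk qubit_key n_qubits
  if dut_order = "cudaq" then
    -- qb[i] = 1 if kk[i] == "1" else 0  (list built by index over range(n_qubits))
    pvA_finish ((PySem.List.pyRange 0 n_qubits 1).map (fun i =>
        if (PySem.List.pyGet? kk i).getD ' ' = '1' then (1 : Int) else 0))
      n_qubits n_clbits meas_q2c
  else if dut_order = "qiskit" then
    -- qb[i] = 1 if kk[n_qubits - 1 - i] == "1" else 0
    pvA_finish ((PySem.List.pyRange 0 n_qubits 1).map (fun i =>
        if (PySem.List.pyGet? kk (n_qubits - 1 - i)).getD ' ' = '1' then (1 : Int) else 0))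
      n_qubits n_clbits meas_q2c
  else ""  -- raise ValueError(...): excluded by Pre_

-- ===== PORT B =====
-- helper: kk after strip and B's pad/truncate (same fixup, written as a two-way comparison)
def pvB_kk (qubit_key : String) (n_qubits : Int) : List Char :=
  let kk0 := (PySem.Str.replace qubit_key " " "").toList
  if (kk0.length : Int) < n_qubits then
    List.replicate (n_qubits - kk0.length).toNat '0' ++ kk0
  else if n_qubits < (kk0.length : Int) then
    PySem.List.slice kk0 (some ((kk0.length : Int) - n_qubits)) none  -- kk[len(kk)-n_qubits:]
  else kk0

-- helper: 'c2q = [-1]*max(n_clbits,0); for q in range(min(n_qubits, len(meas_q2c))): ...' (last wins)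
def pvB_c2q (n_qubits : Int) (n_clbits : Int) (meas_q2c : List Int) : List Int :=
  (PySem.List.pyRange 0 (min n_qubits (meas_q2c.length : Int)) 1).foldl
    (fun c2q q =>
      let c := PySem.List.pyGetD meas_q2c q 0
      if 0 ≤ c ∧ c < n_clbits then PySem.List.pySetD c2q c q else c2q)
    (List.replicate (max n_clbits 0).toNat (-1 : Int))

def dut_qubitkey_to_c0_first_classicalkey_py_alt (qubit_key : String) (n_qubits : Int) (n_clbits : Int) (dut_order : String) (meas_q2c : List Int) : String :=
  if dut_order ≠ "cudaq" ∧ dut_order ≠ "qiskit" then ""  -- raise ValueError(...): excluded by Pre_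
  else
    let kk := pvB_kk qubit_key n_qubits
    let c2q := pvB_c2q n_qubits n_clbits meas_q2c
    PySem.Str.join "" ((PySem.List.pyRange 0 n_clbits 1).map (fun c =>
        let q := PySem.List.pyGetD c2q c (-1)
        if q < 0 then "0"
        else
          let pos := if dut_order = "cudaq" then q else n_qubits - 1 - q
          if (PySem.List.pyGet? kk pos).getD ' ' = '1' then "1" else "0"))

-- ===== PRECONDITION & SPEC =====
-- Pre_ excludes exactly the inputs where A raises ValueError (unknown dut_order); B raises there too.
def Pre_dut_qubitkey_to_c0_first_classicalkey_py (qubit_key : String) (n_qubits : Int) (n_clbits : Int) (dut_order : String) (meas_q2c : List Int) : Prop :=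
  dut_order = "cudaq" ∨ dut_order = "qiskit"
instance (qubit_key : String) (n_qubits : Int) (n_clbits : Int) (dut_order : String) (meas_q2c : List Int) : Decidable (Pre_dut_qubitkey_to_c0_first_classicalkey_py qubit_key n_qubits n_clbits dut_order meas_q2c) := by unfold Pre_dut_qubitkey_to_c0_first_classicalkey_py; infer_instance

def pvWitness_dut_qubitkey_to_c0_first_classicalkey_py : String × Int × Int × String × List Int := ("01", 2, 2, "cudaq", [1, 0])

def Spec_dut_qubitkey_to_c0_first_classicalkey_py (qubit_key : String) (n_qubits : Int) (n_clbits : Int) (dut_order : String) (meas_q2c : List Int) (out : String) : Prop := out = dut_qubitkey_to_c0_first_classicalkey_py_alt qubit_key n_qubits n_clbits dut_order meas_q2c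
instance (qubit_key : String) (n_qubits : Int) (n_clbits : Int) (dut_order : String) (meas_q2c : List Int) (out : String) : Decidable (Spec_dut_qubitkey_to_c0_first_classicalkey_py qubit_key n_qubits n_clbits dut_order meas_q2c out) := by unfold Spec_dut_qubitkey_to_c0_first_classicalkey_py; infer_instance

-- ===== CLAIM (what is proved, stated in full; the proofs are below) =====
def Claim_equal_dut_qubitkey_to_c0_first_classicalkey_py : Prop := ∀ (qubit_key : String) (n_qubits : Int) (n_clbits : Int) (dut_order : String) (meas_q2c : List Int), Dom_dut_qubitkey_to_c0_first_classicalkey_py qubit_key n_qubits n_clbits dut_order meas_q2c → Pre_dut_qubitkey_to_c0_first_classicalkey_py qubit_key n_qubits n_clbits dut_order meas_q2c → Spec_dut_qubitkey_to_c0_first_classicalkey_py qubit_key n_qubits n_clbits dut_order meas_q2c (dut_qubitkey_to_c0_first_classicalkey_py qubit_key n_qubits n_clbits dut_order meas_q2c)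

-- ===== LEMMAS AND PROOFS =====

-- A's and B's pad/truncate fixups agree for a positive qubit count
theorem pv_kk_eq (qubit_key : String) (n_qubits : Int) (h : 0 < n_qubits) :
    pvA_kk qubit_key n_qubits = pvB_kk qubit_key n_qubits := by
  unfold pvA_kk pvB_kk
  set kk0 := (PySem.Str.replace qubit_key " " "").toList with hkk0
  rcases lt_trichotomy ((kk0.length : Int)) n_qubits with hlt | heq | hgt
  · rw [if_pos (by omega), if_pos hlt, if_pos hlt]
  · rw [if_neg (by omega), if_neg (by omega), if_neg (by omega)]
  · rw [if_pos (by omega), if_neg (by omega), if_neg (by omega), if_pos hgt]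
    rw [PySem.List.slice_some_none, PySem.List.slice_some_none]
    have h1 : -n_qubits = -((n_qubits.toNat : Nat) : Int) := by omega
    have h2 : (kk0.length : Int) - n_qubits = ((kk0.length - n_qubits.toNat : Nat) : Int) := by
      omega
    rw [h1, h2, PySem.List.clampIdx_neg_natCast _ _ (by omega), PySem.List.clampIdx_natCast]
    congr 1
    omega

-- A's step function after replacing the qb lookup by the generating function f
def pvStepA (n_clbits : Int) (meas_q2c : List Int) (f : Int → Int) (cb : List Int) (q : Int) : List Int :=
  let c := if q < (meas_q2c.length : Int) then PySem.List.pyGetD meas_q2c q (-1) else -1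
  if c < 0 ∨ n_clbits ≤ c then cb else PySem.List.pySetD cb c (f q)

def pvStepB (n_clbits : Int) (meas_q2c : List Int) (c2q : List Int) (q : Int) : List Int :=
  let c := PySem.List.pyGetD meas_q2c q 0
  if 0 ≤ c ∧ c < n_clbits then PySem.List.pySetD c2q c q else c2q

-- getD through a single in-range set
theorem pv_getD_set (l : List Int) (n : Nat) (v : Int) (j : Nat) (d : Int) (hn : n < l.length) :
    (l.set n v).getD j d = if j = n then v else l.getD j d := by
  by_cases h : j = n
  · subst h; simp [List.getD, hn]
  · simp [List.getD, h, Ne.symm h]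

-- the relation maintained between A's cb and B's c2q
def pvInv (n_clbits : Int) (fA fB : Int → Int) (cb c2q : List Int) : Prop :=
  cb.length = n_clbits.toNat ∧ c2q.length = n_clbits.toNat ∧
  ∀ j : Nat, j < n_clbits.toNat →
    (c2q.getD j (-1) < 0 ∧ cb.getD j 0 = 0) ∨
    (0 ≤ c2q.getD j (-1) ∧ cb.getD j 0 = fA (c2q.getD j (-1)) ∧
      fA (c2q.getD j (-1)) = fB (c2q.getD j (-1)))

theorem pv_inv_fold (n_clbits : Int) (meas_q2c : List Int) (fA fB : Int → Int) :
    ∀ (qs : List Int) (cb c2q : List Int),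
    (∀ q ∈ qs, 0 ≤ q ∧ q < (meas_q2c.length : Int) ∧ fA q = fB q) →
    pvInv n_clbits fA fB cb c2q →
    pvInv n_clbits fA fB (qs.foldl (pvStepA n_clbits meas_q2c fA) cb)
      (qs.foldl (pvStepB n_clbits meas_q2c) c2q) := by
  intro qs
  induction qs with
  | nil => intro cb c2q _ hinv; exact hinv
  | cons q qs ih =>
    intro cb c2q h hinv
    obtain ⟨hq0, hqlen, hqf⟩ := h q (by simp)
    apply ih _ _ (fun x hx => h x (by simp [hx]))
    obtain ⟨hlb, hlq, hrel⟩ := hinv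
    have hc : (if q < (meas_q2c.length : Int) then PySem.List.pyGetD meas_q2c q (-1) else -1)
        = PySem.List.pyGetD meas_q2c q 0 := by
      rw [if_pos hqlen, PySem.List.pyGetD_eq_getElem meas_q2c (-1) hq0 hqlen,
        PySem.List.pyGetD_eq_getElem meas_q2c 0 hq0 hqlen]
    by_cases hcr : 0 ≤ PySem.List.pyGetD meas_q2c q 0 ∧ PySem.List.pyGetD meas_q2c q 0 < n_clbits
    · have hstepA : pvStepA n_clbits meas_q2c fA cb q
          = cb.set (PySem.List.pyGetD meas_q2c q 0).toNat (fA q) := by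
        unfold pvStepA
        rw [hc, if_neg (by omega), PySem.List.pySetD_of_nonneg cb (fA q) hcr.1]
      have hstepB : pvStepB n_clbits meas_q2c c2q q
          = c2q.set (PySem.List.pyGetD meas_q2c q 0).toNat q := by
        unfold pvStepB
        rw [if_pos hcr, PySem.List.pySetD_of_nonneg c2q q hcr.1]
      rw [hstepA, hstepB]
      have hcb : (PySem.List.pyGetD meas_q2c q 0).toNat < cb.length := by omega
      have hcq : (PySem.List.pyGetD meas_q2c q 0).toNat < c2q.length := by omega
      refine ⟨by simpa using hlb, by simpa using hlq, ?_⟩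
      intro j hj
      rw [pv_getD_set _ _ _ _ _ hcb, pv_getD_set _ _ _ _ _ hcq]
      by_cases hje : j = (PySem.List.pyGetD meas_q2c q 0).toNat
      · simp only [hje]
        exact Or.inr ⟨hq0, rfl, hqf⟩
      · simp only [if_neg hje]
        exact hrel j hj
    · have hstepA : pvStepA n_clbits meas_q2c fA cb q = cb := by
        unfold pvStepA
        rw [hc, if_pos (by omega)]
      have hstepB : pvStepB n_clbits meas_q2c c2q q = c2q := by
        unfold pvStepB
        rw [if_neg hcr]
      rw [hstepA, hstepB]
      exact ⟨hlb, hlq, hrel⟩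

theorem pv_fold_noop (n_clbits : Int) (meas_q2c : List Int) (fA : Int → Int) :
    ∀ (qs : List Int) (cb : List Int), (∀ q ∈ qs, (meas_q2c.length : Int) ≤ q) →
    qs.foldl (pvStepA n_clbits meas_q2c fA) cb = cb := by
  intro qs
  induction qs with
  | nil => intro cb _; rfl
  | cons q qs ih =>
    intro cb h
    have hq := h q (by simp)
    have : pvStepA n_clbits meas_q2c fA cb q = cb := by
      unfold pvStepA
      have : ¬ (q < (meas_q2c.length : Int)) := by omega
      simp [this]
    simpa [this] using ih cb (fun x hx => h x (by simp [hx]))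

-- A's cb fold equals the fold of pvStepA fA over the same range, for qb = map of fA over the range
theorem pv_cb_eq_fold (n_qubits n_clbits : Int) (meas_q2c : List Int) (fA : Int → Int) :
    pvA_cb ((PySem.List.pyRange 0 n_qubits 1).map fA) n_qubits n_clbits meas_q2c =
      (PySem.List.pyRange 0 n_qubits 1).foldl (pvStepA n_clbits meas_q2c fA)
        (List.replicate n_clbits.toNat (0 : Int)) := by
  unfold pvA_cb
  apply PySem.List.foldl_congr_mem
  intro acc q hq
  have hm := (PySem.List.mem_pyRange_one).1 hq
  unfold pvStepA
  rw [PySem.List.pyGetD_map_pyRange_of_nonneg fA n_qubits q 0 hm.1 hm.2]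

-- after both loops, the invariant holds between pvA_cb and pvB_c2q
theorem pv_inv_final (n_qubits n_clbits : Int) (meas_q2c : List Int) (fA fB : Int → Int)
    (hf : ∀ q, 0 ≤ q → q < n_qubits → fA q = fB q) :
    pvInv n_clbits fA fB
      (pvA_cb ((PySem.List.pyRange 0 n_qubits 1).map fA) n_qubits n_clbits meas_q2c)
      (pvB_c2q n_qubits n_clbits meas_q2c) := by
  have hinit : pvInv n_clbits fA fB (List.replicate n_clbits.toNat (0 : Int))
      (List.replicate (max n_clbits 0).toNat (-1 : Int)) := by
    refine ⟨by simp, by simp; omega, ?_⟩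
    intro j hj
    have h1 : (List.replicate n_clbits.toNat (0 : Int)).getD j 0 = 0 := by
      simp [List.getD, hj]
    have hj' : j < (max n_clbits 0).toNat := by omega
    have h2 : (List.replicate (max n_clbits 0).toNat (-1 : Int)).getD j (-1) = -1 := by
      simp [List.getD, hj']
    rw [h1, h2]; exact Or.inl ⟨by norm_num, rfl⟩
  rw [pv_cb_eq_fold]
  show pvInv n_clbits fA fB _
    ((PySem.List.pyRange 0 (min n_qubits (meas_q2c.length : Int)) 1).foldl
      (pvStepB n_clbits meas_q2c) (List.replicate (max n_clbits 0).toNat (-1 : Int)))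
  by_cases hn : 0 ≤ n_qubits
  · have hsplit : PySem.List.pyRange 0 n_qubits 1
        = PySem.List.pyRange 0 (min n_qubits (meas_q2c.length : Int)) 1
          ++ PySem.List.pyRange (min n_qubits (meas_q2c.length : Int)) n_qubits 1 := by
      refine PySem.List.pyRange_one_append 0 _ n_qubits (by omega) (by omega)
    rw [hsplit, List.foldl_append]
    rw [pv_fold_noop n_clbits meas_q2c fA _ _ (by
      intro q hq
      have hm := (PySem.List.mem_pyRange_one).1 hq
      omega)]
    refine pv_inv_fold n_clbits meas_q2c fA fB _ _ _ ?_ hinit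
    intro q hq
    have hm := (PySem.List.mem_pyRange_one).1 hq
    exact ⟨hm.1, by omega, hf q hm.1 (by omega)⟩
  · rw [PySem.List.pyRange_one_eq_nil (by omega : n_qubits ≤ 0),
      PySem.List.pyRange_one_eq_nil (by omega : min n_qubits (meas_q2c.length : Int) ≤ 0)]
    exact hinit

-- generic branch lemma: with matching bit-generating functions the two outputs agree
theorem pv_branch (n_qubits n_clbits : Int) (meas_q2c : List Int) (fA fB : Int → Int)
    (chB : Int → String)
    (hf : ∀ q, 0 ≤ q → q < n_qubits → fA q = fB q)
    (hch : ∀ q, chB q = if fB q = 0 then "0" else "1") :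
    pvA_finish ((PySem.List.pyRange 0 n_qubits 1).map fA) n_qubits n_clbits meas_q2c =
      PySem.Str.join "" ((PySem.List.pyRange 0 n_clbits 1).map (fun c =>
        let q := PySem.List.pyGetD (pvB_c2q n_qubits n_clbits meas_q2c) c (-1)
        if q < 0 then "0" else chB q)) := by
  obtain ⟨hlb, hlq, hrel⟩ := pv_inv_final n_qubits n_clbits meas_q2c fA fB hf
  unfold pvA_finish
  congr 1
  apply List.map_congr_left
  intro c hc
  have hm := (PySem.List.mem_pyRange_one).1 hc
  have hj : c.toNat < n_clbits.toNat := by omega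
  have hA : PySem.List.pyGetD
      (pvA_cb ((PySem.List.pyRange 0 n_qubits 1).map fA) n_qubits n_clbits meas_q2c) c 0
      = (pvA_cb ((PySem.List.pyRange 0 n_qubits 1).map fA) n_qubits n_clbits meas_q2c).getD c.toNat 0 := by
    rw [PySem.List.pyGetD_eq_getElem _ 0 hm.1 (by rw [hlb]; omega)]
    simp [List.getD, List.getElem?_eq_getElem (show c.toNat < (pvA_cb _ _ _ _).length by rw [hlb]; omega)]
  have hB : PySem.List.pyGetD (pvB_c2q n_qubits n_clbits meas_q2c) c (-1)
      = (pvB_c2q n_qubits n_clbits meas_q2c).getD c.toNat (-1) := by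
    rw [PySem.List.pyGetD_eq_getElem _ (-1) hm.1 (by rw [hlq]; omega)]
    simp [List.getD, List.getElem?_eq_getElem (show c.toNat < (pvB_c2q _ _ _).length by rw [hlq]; omega)]
  rw [hA]
  show _ = (if PySem.List.pyGetD (pvB_c2q n_qubits n_clbits meas_q2c) c (-1) < 0 then "0"
    else chB (PySem.List.pyGetD (pvB_c2q n_qubits n_clbits meas_q2c) c (-1)))
  rw [hB]
  rcases hrel c.toNat hj with ⟨hneg, hzero⟩ | ⟨hge, hfa, hfab⟩
  · simp only [List.getD] at hzero hneg
    simp [hzero, hneg]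
  · simp only [List.getD] at hge hfa hfab ⊢
    have hnn : ¬ ((pvB_c2q n_qubits n_clbits meas_q2c)[c.toNat]?.getD (-1) < 0) := by omega
    simp only [hfa, hfab, hch, if_neg hnn]
    by_cases hz : fB ((pvB_c2q n_qubits n_clbits meas_q2c)[c.toNat]?.getD (-1)) = 0 <;> simp [hz]

-- ===== VERDICT (by name: the statement is the Claim_ definition above) =====
theorem dut_qubitkey_to_c0_first_classicalkey_py_spec : Claim_equal_dut_qubitkey_to_c0_first_classicalkey_py := by
  intro qubit_key n_qubits n_clbits dut_order meas_q2c _hdom hpre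
  unfold Spec_dut_qubitkey_to_c0_first_classicalkey_py
  rcases hpre with h | h
  · subst h
    have hA : dut_qubitkey_to_c0_first_classicalkey_py qubit_key n_qubits n_clbits "cudaq" meas_q2c
        = pvA_finish ((PySem.List.pyRange 0 n_qubits 1).map (fun i =>
            if (PySem.List.pyGet? (pvA_kk qubit_key n_qubits) i).getD ' ' = '1' then (1:Int) else 0))
          n_qubits n_clbits meas_q2c := by
      simp [dut_qubitkey_to_c0_first_classicalkey_py]
    have hB : dut_qubitkey_to_c0_first_classicalkey_py_alt qubit_key n_qubits n_clbits "cudaq" meas_q2c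
        = PySem.Str.join "" ((PySem.List.pyRange 0 n_clbits 1).map (fun c =>
            if PySem.List.pyGetD (pvB_c2q n_qubits n_clbits meas_q2c) c (-1) < 0 then "0"
            else if (PySem.List.pyGet? (pvB_kk qubit_key n_qubits)
                (PySem.List.pyGetD (pvB_c2q n_qubits n_clbits meas_q2c) c (-1))).getD ' ' = '1'
              then "1" else "0")) := by
      simp [dut_qubitkey_to_c0_first_classicalkey_py_alt]
    rw [hA, hB]
    exact pv_branch n_qubits n_clbits meas_q2c
      (fun i => if (PySem.List.pyGet? (pvA_kk qubit_key n_qubits) i).getD ' ' = '1' then (1:Int) else 0)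
      (fun q => if (PySem.List.pyGet? (pvB_kk qubit_key n_qubits) q).getD ' ' = '1' then (1:Int) else 0)
      (fun q => if (PySem.List.pyGet? (pvB_kk qubit_key n_qubits) q).getD ' ' = '1' then "1" else "0")
      (fun q _h0 hlt => by rw [pv_kk_eq qubit_key n_qubits (by omega)])
      (fun q => by
        by_cases hq : (PySem.List.pyGet? (pvB_kk qubit_key n_qubits) q).getD ' ' = '1' <;> simp [hq])
  · subst h
    have hA : dut_qubitkey_to_c0_first_classicalkey_py qubit_key n_qubits n_clbits "qiskit" meas_q2c
        = pvA_finish ((PySem.List.pyRange 0 n_qubits 1).map (fun i =>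
            if (PySem.List.pyGet? (pvA_kk qubit_key n_qubits) (n_qubits - 1 - i)).getD ' ' = '1'
              then (1:Int) else 0))
          n_qubits n_clbits meas_q2c := by
      simp [dut_qubitkey_to_c0_first_classicalkey_py]
    have hB : dut_qubitkey_to_c0_first_classicalkey_py_alt qubit_key n_qubits n_clbits "qiskit" meas_q2c
        = PySem.Str.join "" ((PySem.List.pyRange 0 n_clbits 1).map (fun c =>
            if PySem.List.pyGetD (pvB_c2q n_qubits n_clbits meas_q2c) c (-1) < 0 then "0"
            else if (PySem.List.pyGet? (pvB_kk qubit_key n_qubits)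
                (n_qubits - 1 - PySem.List.pyGetD (pvB_c2q n_qubits n_clbits meas_q2c) c (-1))).getD ' ' = '1'
              then "1" else "0")) := by
      simp [dut_qubitkey_to_c0_first_classicalkey_py_alt]
    rw [hA, hB]
    exact pv_branch n_qubits n_clbits meas_q2c
      (fun i => if (PySem.List.pyGet? (pvA_kk qubit_key n_qubits) (n_qubits - 1 - i)).getD ' ' = '1' then (1:Int) else 0)
      (fun q => if (PySem.List.pyGet? (pvB_kk qubit_key n_qubits) (n_qubits - 1 - q)).getD ' ' = '1' then (1:Int) else 0)
      (fun q => if (PySem.List.pyGet? (pvB_kk qubit_key n_qubits) (n_qubits - 1 - q)).getD ' ' = '1' then "1" else "0")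
      (fun q _h0 hlt => by rw [pv_kk_eq qubit_key n_qubits (by omega)])
      (fun q => by
        by_cases hq : (PySem.List.pyGet? (pvB_kk qubit_key n_qubits) (n_qubits - 1 - q)).getD ' ' = '1' <;> simp [hq])
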